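-- pv_equiv track=rewrite | github.com/Codestar007/PoP1_ExamPractice | AllRepos/worksheet-on-file-handling-Codestar007/ex15.py | defineKey
-- ===== SOURCE A (Python) =====
-- def defineKey(cryptkey):
--     """generate key and return it as a string"""
--     alphabeths = set("ABCDEFGHIJKLMNOPQRSTUVWXYZ")
--     rawKey = set(cryptkey)
--     newkey = ""
--
--     for L in range(len(cryptkey)):
--         if newkey.find(cryptkey[L]) == -1:
--             newkey = newkey + cryptkey[L]
--     alphabeths.difference_update(rawKey)
--     reverseAlpha = (''.join(sorted(''.join(str(i) for i in alphabeths), reverse=True)))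
--     cryptcode = newkey + reverseAlpha
--     return cryptcode
-- ===== SOURCE B (Python) =====
-- def defineKey(cryptkey):
--     """generate key and return it as a string"""
--     seen = set()
--     pieces = []
--     for ch in cryptkey:
--         if ch not in seen:
--             seen.add(ch)
--             pieces.append(ch)
--     tail = ''.join(ch for ch in "ZYXWVUTSRQPONMLKJIHGFEDCBA" if ch not in seen)
--     return ''.join(pieces) + tail
-- ===== Notes on version B (the rewrite author's own statement) =====
-- stated objective: simpler
-- what changed: One pass with a seen-set accumulating the dedup (instead of repeated .find on the growing key), and the tail is a single filter over the reversed-alphabet constant instead of building a set, difference_update and sorting it.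
import Mathlib
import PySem

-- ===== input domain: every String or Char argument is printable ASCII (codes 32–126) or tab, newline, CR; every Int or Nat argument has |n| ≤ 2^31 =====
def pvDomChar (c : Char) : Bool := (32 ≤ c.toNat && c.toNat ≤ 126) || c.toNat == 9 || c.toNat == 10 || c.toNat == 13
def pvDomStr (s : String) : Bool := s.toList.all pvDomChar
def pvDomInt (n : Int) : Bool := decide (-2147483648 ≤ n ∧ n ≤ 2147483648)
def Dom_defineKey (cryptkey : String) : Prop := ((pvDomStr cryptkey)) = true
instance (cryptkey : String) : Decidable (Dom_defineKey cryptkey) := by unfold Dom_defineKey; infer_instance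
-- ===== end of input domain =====

-- B replaces A's quadratic .find-based dedup by a one-pass seen-set, and the tail's
-- set/difference_update/sort by a single filter over the reversed-alphabet constant (objective: simpler).

-- ===== PORT A =====
def defineKey (cryptkey : String) : String :=
  let alphabeths : PySem.Set Char := PySem.Set.ofList "ABCDEFGHIJKLMNOPQRSTUVWXYZ".toList
  let rawKey : PySem.Set Char := PySem.Set.ofList cryptkey.toList
  let newkey : List Char :=
    (PySem.List.pyRange 0 (cryptkey.toList.length : Int) 1).foldl
      (fun nk L =>
        -- cryptkey[L]: L ∈ range(len(cryptkey)) is always in range, so pyGetD is exact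
        let c := PySem.List.pyGetD cryptkey.toList L ' '
        if PySem.Chars.find nk [c] == -1 then nk ++ [c] else nk) []
  let alphabeths2 := PySem.Set.diff alphabeths rawKey
  -- sorted(..., reverse=True) of the set's elements (str(i) of a 1-char string is itself)
  let reverseAlpha := PySem.List.sorted alphabeths2 (fun c => c) true
  String.ofList (newkey ++ reverseAlpha)

-- ===== PORT B =====
def defineKey_alt (cryptkey : String) : String :=
  let p := cryptkey.toList.foldl
      (fun (acc : PySem.Set Char × List Char) ch =>
        if PySem.Set.contains acc.1 ch then acc
        else (PySem.Set.add acc.1 ch, acc.2 ++ [ch]))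
      (PySem.Set.empty, [])
  let tail := "ZYXWVUTSRQPONMLKJIHGFEDCBA".toList.filter
      (fun ch => !PySem.Set.contains p.1 ch)
  String.ofList (p.2 ++ tail)

-- ===== PRECONDITION & SPEC =====
def Spec_defineKey (cryptkey : String) (out : String) : Prop := out = defineKey_alt cryptkey
instance (cryptkey : String) (out : String) : Decidable (Spec_defineKey cryptkey out) := by unfold Spec_defineKey; infer_instance

-- ===== CLAIM (what is proved, stated in full; the proofs are below) =====
def Claim_equal_defineKey : Prop := ∀ (cryptkey : String), Dom_defineKey cryptkey → Spec_defineKey cryptkey (defineKey cryptkey)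

-- ===== LEMMAS AND PROOFS =====

theorem pv_singleton_infix_iff (c : Char) (l : List Char) : [c] <:+: l ↔ c ∈ l := by
  constructor
  · intro h; exact (List.singleton_sublist).1 h.sublist
  · intro h
    obtain ⟨s, t, rfl⟩ := List.append_of_mem h
    exact ⟨s, t, by simp⟩

-- A's loop step (newkey.find(c) == -1 test) is exactly set-style add
theorem pv_stepA_eq_add (nk : List Char) (c : Char) :
    (if PySem.Chars.find nk [c] == -1 then nk ++ [c] else nk) = PySem.Set.add nk c := by
  unfold PySem.Set.add
  by_cases h : c ∈ nk
  · have : ¬ PySem.Chars.find nk [c] = -1 := by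
      rw [PySem.Chars.find_eq_neg_one_iff, not_not]
      exact (pv_singleton_infix_iff c nk).2 h
    simp [PySem.Set.contains, this, h]
  · have : PySem.Chars.find nk [c] = -1 := by
      rw [PySem.Chars.find_eq_neg_one_iff]
      exact fun hh => h ((pv_singleton_infix_iff c nk).1 hh)
    simp [PySem.Set.contains, this, h]

-- B's loop keeps seen = pieces as an invariant
theorem pv_loopB (l : List Char) (x : List Char) :
    l.foldl (fun (acc : PySem.Set Char × List Char) ch =>
        if PySem.Set.contains acc.1 ch then acc
        else (PySem.Set.add acc.1 ch, acc.2 ++ [ch])) (x, x)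
      = (l.foldl PySem.Set.add x, l.foldl PySem.Set.add x) := by
  induction l generalizing x with
  | nil => rfl
  | cons c t ih =>
      have hstep : (if PySem.Set.contains x c = true then ((x, x) : PySem.Set Char × List Char)
            else (PySem.Set.add x c, x ++ [c])) = (PySem.Set.add x c, PySem.Set.add x c) := by
        by_cases h : PySem.Set.contains x c = true
        · rw [if_pos h]; unfold PySem.Set.add; rw [if_pos h]
        · rw [if_neg h]; unfold PySem.Set.add; rw [if_neg h]
      rw [show List.foldl (fun (acc : PySem.Set Char × List Char) ch =>
            if PySem.Set.contains acc.1 ch then acc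
            else (PySem.Set.add acc.1 ch, acc.2 ++ [ch])) (x, x) (c :: t)
          = List.foldl _ (if PySem.Set.contains x c = true then ((x, x) : PySem.Set Char × List Char)
            else (PySem.Set.add x c, x ++ [c])) t from rfl, hstep, ih]
      rfl

-- the tail: reverse-sorted set difference = filter of the Z→A constant
theorem pv_tail (s : List Char) :
    PySem.List.sorted
        (PySem.Set.diff (PySem.Set.ofList "ABCDEFGHIJKLMNOPQRSTUVWXYZ".toList) (PySem.Set.ofList s))
        (fun c => c) true
      = "ZYXWVUTSRQPONMLKJIHGFEDCBA".toList.filter (fun ch => !PySem.Set.contains (PySem.Set.ofList s) ch) := by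
  have hAZ : PySem.Set.ofList "ABCDEFGHIJKLMNOPQRSTUVWXYZ".toList
      = "ABCDEFGHIJKLMNOPQRSTUVWXYZ".toList :=
    PySem.Set.ofList_eq_self_of_nodup _ (by decide)
  have hrev : "ZYXWVUTSRQPONMLKJIHGFEDCBA".toList
      = "ABCDEFGHIJKLMNOPQRSTUVWXYZ".toList.reverse := by decide
  set p : Char → Bool := fun ch => !PySem.Set.contains (PySem.Set.ofList s) ch with hp
  apply PySem.List.sorted_rev_eq_of_perm_of_pairwise_gt
  · -- permutation
    rw [PySem.Set.diff, hAZ, hrev, List.filter_reverse]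
    exact (List.filter p "ABCDEFGHIJKLMNOPQRSTUVWXYZ".toList).reverse_perm
  · -- strictly decreasing
    rw [hrev, List.filter_reverse]
    have : ("ABCDEFGHIJKLMNOPQRSTUVWXYZ".toList.filter p).Pairwise (· < ·) :=
      List.Pairwise.filter p (by decide)
    simpa using this.reverse

-- ===== VERDICT (by name: the statement is the Claim_ definition above) =====
theorem defineKey_spec : Claim_equal_defineKey := by
  intro cryptkey _
  unfold Spec_defineKey defineKey defineKey_alt
  simp only []
  set s := cryptkey.toList with hs
  -- A's index loop is a fold over the characters
  rw [PySem.List.foldl_pyRange_zero_pyGetD' s ' '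
        (fun nk c => if PySem.Chars.find nk [c] == -1 then nk ++ [c] else nk) []]
  -- A's step = Set.add
  have hA : s.foldl (fun nk c => if PySem.Chars.find nk [c] == -1 then nk ++ [c] else nk) []
      = s.foldl PySem.Set.add [] := by
    apply PySem.List.foldl_congr_mem
    intro acc x _
    exact pv_stepA_eq_add acc x
  rw [hA]
  -- B's fold
  rw [show (PySem.Set.empty : PySem.Set Char) = ([] : List Char) from rfl]
  rw [pv_loopB s []]
  have hofl : PySem.Set.ofList s = s.foldl PySem.Set.add [] := PySem.Set.ofList_eq_foldl s
  rw [← hofl]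
  rw [pv_tail s]
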